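-- pv_equiv track=rewrite | github.com/poojithamiryala/Mission-Rnd-Python | mocktest1_probem3.py | from_custom_base5
-- ===== SOURCE A (Python) =====
-- def from_custom_base5(s):
--     w="aeiou"
--     if(type(s).__name__!="str"):
--         raise TypeError
--     if(s=="" or s==None):
--         raise ValueError
--     s=s.strip()
--     res=s
--     first=""
--     if(s[0]=="+" or s[0]=='-'):
--         first=s[0]
--         res=s[1:]
--     l=[x for x in res if(x not in set("aeiou"))]
--     if(len(l)==0):
--         t=[str(w.find(x.lower())) for x in res]
--         y=int(''.join(t),base=5)
--         if(first=="-"):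
--             y=y*-1
--         return  y
--     else:
--         raise  ValueError
-- ===== SOURCE B (Python) =====
-- def from_custom_base5(s):
--     # Same validation/sign behaviour as the original, but evaluates the value
--     # in a single Horner pass instead of building a digit string for int(..., base=5).
--     if type(s).__name__ != "str":
--         raise TypeError
--     if s == "":
--         raise ValueError
--     s = s.strip()
--     c = s[0]
--     neg = c == "-"
--     body = s[1:] if c in "+-" else s
--     if not body:
--         raise ValueError  # no digits after the sign
--     y = 0
--     for ch in body:
--         y = y * 5 + "aeiou".index(ch)  # ValueError if ch is not a vowel
--     return -y if neg else y
-- ===== Notes on version B (the rewrite author's own statement) =====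
-- stated objective: simpler
-- what changed: Instead of mapping each vowel to a digit character, joining them into a string and calling int(..., base=5), B evaluates the value directly in one Horner pass (y = y*5 + index), with the same strip/sign handling and the same exceptions on invalid input.
import Mathlib
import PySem

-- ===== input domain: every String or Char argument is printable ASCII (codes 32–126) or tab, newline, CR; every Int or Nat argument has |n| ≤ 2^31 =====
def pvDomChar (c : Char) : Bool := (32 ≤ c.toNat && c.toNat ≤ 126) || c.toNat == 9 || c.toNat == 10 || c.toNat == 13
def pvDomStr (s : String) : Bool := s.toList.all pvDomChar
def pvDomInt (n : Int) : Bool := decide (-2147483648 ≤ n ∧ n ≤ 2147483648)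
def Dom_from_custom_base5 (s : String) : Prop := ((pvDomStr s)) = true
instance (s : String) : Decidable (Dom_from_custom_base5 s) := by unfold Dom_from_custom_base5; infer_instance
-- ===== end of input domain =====

-- B replaces A's digit-string building plus int(..., base=5) by a single Horner pass (objective: simpler).
-- Equivalence is about the RETURN value on Pre_ (where A returns normally); both programs raise on the same inputs otherwise.

-- ===== PORT A =====
-- hand port of int(x, base=5), exact for what A passes to it: '' (→ ValueError = none) or a
-- nonempty string of digit chars '0'..'4' (Python's extra forms — whitespace, sign, underscores,
-- other digits — can never reach this call in A, since they are not produced by str(w.find(..)) ∈ 0..4).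
def pvParse5 (acc : Int) : List Char → Option Int
  | [] => some acc
  | c :: cs => if '0' ≤ c ∧ c ≤ '4' then pvParse5 (acc * 5 + ((c.toNat : Int) - 48)) cs else none

def pvIntBase5? (ds : List Char) : Option Int :=
  match ds with
  | [] => none          -- int('', base=5) raises ValueError
  | _ => pvParse5 0 ds

def from_custom_base5 (s : String) : Int :=
  let w : List Char := ['a', 'e', 'i', 'o', 'u']
  -- type(s) is always str here; if s == "": ValueError
  if s = "" then 0
  else
    let cs := PySem.Chars.strip s.toList
    match PySem.List.pyGet? cs 0 with
    | none => 0         -- s[0]: IndexError on whitespace-only s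
    | some c0 =>
      let sign := c0 == '+' || c0 == '-'
      let first : Option Char := if sign then some c0 else none
      let res := if sign then PySem.List.slice cs (some 1) none else cs
      let l := res.filter (fun x => !(w.contains x))
      if l = [] then
        let t := res.map (fun x => PySem.Int.toChars (PySem.Chars.find w [PySem.Chars.lowerChar x]))
        match pvIntBase5? (PySem.Chars.join [] t) with
        | none => 0     -- ValueError: int('') when res is empty
        | some y => if first = some '-' then y * (-1) else y
      else 0            -- ValueError: some char of res is not a vowel

-- ===== PORT B =====
def pvHorner (y : Int) : List Char → Option Int
  | [] => some y
  | c :: cs =>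
    match PySem.List.index? ['a', 'e', 'i', 'o', 'u'] c with
    | none => none      -- "aeiou".index(ch): ValueError
    | some d => pvHorner (y * 5 + (d : Int)) cs

def from_custom_base5_alt (s : String) : Int :=
  if s = "" then 0      -- ValueError
  else
    match PySem.Chars.strip s.toList with
    | [] => 0           -- s[0]: IndexError
    | c :: rest =>
      let neg := c == '-'
      let body := if c == '+' || c == '-' then rest else c :: rest
      if body = [] then 0  -- ValueError: no digits after the sign
      else
        match pvHorner 0 body with
        | none => 0     -- ValueError from "aeiou".index
        | some y => if neg then -y else y

-- ===== PRECONDITION & SPEC =====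
-- Pre_ = exactly the inputs on which Python A returns normally: after stripping, a nonempty string
-- which, after an optional leading '+'/'-', is a nonempty run of lowercase vowels. Outside Pre_
-- A raises (ValueError or IndexError) and nothing is claimed.
def Pre_from_custom_base5 (s : String) : Prop :=
  let cs := PySem.Chars.strip s.toList
  let body := if cs.head? = some '+' ∨ cs.head? = some '-' then cs.tail else cs
  cs ≠ [] ∧ body ≠ [] ∧ body.all (fun x => (['a', 'e', 'i', 'o', 'u'] : List Char).contains x) = true
instance (s : String) : Decidable (Pre_from_custom_base5 s) := by unfold Pre_from_custom_base5; infer_instance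

def pvWitness_from_custom_base5 : String := "-aei"

def Spec_from_custom_base5 (s : String) (out : Int) : Prop := out = from_custom_base5_alt s
instance (s : String) (out : Int) : Decidable (Spec_from_custom_base5 s out) := by unfold Spec_from_custom_base5; infer_instance

-- ===== CLAIM (what is proved, stated in full; the proofs are below) =====
def Claim_equal_from_custom_base5 : Prop := ∀ (s : String), Dom_from_custom_base5 s → Pre_from_custom_base5 s → Spec_from_custom_base5 s (from_custom_base5 s)

-- ===== LEMMAS AND PROOFS =====

lemma pvJoinNil (t : List (List Char)) : PySem.Chars.join [] t = t.flatten := by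
  simp only [PySem.Chars.join, List.intercalate]
  induction t with
  | nil => rfl
  | cons a t ih =>
    cases t with
    | nil => rfl
    | cons b t => simp_all [List.intersperse]

-- the joined digit string built by A parses (base 5) to exactly B's Horner value
lemma pvParseHorner (body : List Char) (acc : Int)
    (h : ∀ x ∈ body, x ∈ (['a', 'e', 'i', 'o', 'u'] : List Char)) :
    pvParse5 acc ((body.map (fun x =>
      PySem.Int.toChars (PySem.Chars.find ['a', 'e', 'i', 'o', 'u'] [PySem.Chars.lowerChar x]))).flatten)
    = pvHorner acc body := by
  induction body generalizing acc with
  | nil => rfl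
  | cons c cs ih =>
    have hc : c ∈ (['a', 'e', 'i', 'o', 'u'] : List Char) := h c (by simp)
    have hcs : ∀ x ∈ cs, x ∈ (['a', 'e', 'i', 'o', 'u'] : List Char) := fun x hx => h x (by simp [hx])
    fin_cases hc <;>
      simpa [pvParse5, pvHorner, PySem.List.index?] using ih _ hcs

-- the common core: A's parse-of-joined-digits branch equals B's Horner branch, for any sign flag
lemma pvCore (body : List Char) (p : Prop) [Decidable p] (neg : Bool) (hpq : p ↔ neg = true)
    (hbne : body ≠ [])
    (hall : ∀ x ∈ body, x ∈ (['a', 'e', 'i', 'o', 'u'] : List Char)) :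
    (match pvIntBase5? (PySem.Chars.join [] (body.map (fun x =>
        PySem.Int.toChars (PySem.Chars.find ['a','e','i','o','u'] [PySem.Chars.lowerChar x])))) with
     | none => (0 : Int)
     | some y => if p then y * (-1) else y)
    = (match pvHorner 0 body with
       | none => (0 : Int)
       | some y => if neg then -y else y) := by
  obtain ⟨d, tl, hrest⟩ := List.exists_cons_of_ne_nil hbne
  have hjoin : pvIntBase5? (PySem.Chars.join [] (body.map (fun x =>
      PySem.Int.toChars (PySem.Chars.find ['a','e','i','o','u'] [PySem.Chars.lowerChar x]))))
      = pvHorner 0 body := by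
    rw [pvJoinNil]
    have hd : d ∈ (['a','e','i','o','u'] : List Char) := hall d (by simp [hrest])
    have hph := pvParseHorner body 0 hall
    rw [hrest] at hph ⊢
    fin_cases hd <;> simpa [pvIntBase5?] using hph
  rw [hjoin]
  cases pvHorner 0 body with
  | none => rfl
  | some y =>
    show (if p then y * (-1) else y) = (if neg then -y else y)
    by_cases hp : p
    · rw [if_pos hp, if_pos (hpq.mp hp)]; ring
    · rw [if_neg hp, if_neg (fun h => hp (hpq.mpr h))]

theorem from_custom_base5_spec_aux (s : String)
    (hpre : Pre_from_custom_base5 s) : from_custom_base5 s = from_custom_base5_alt s := by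
  unfold Pre_from_custom_base5 at hpre
  obtain ⟨hne, hbne, hall0⟩ := hpre
  rw [List.all_eq_true] at hall0
  have hall : ∀ x ∈ (if (PySem.Chars.strip s.toList).head? = some '+' ∨
      (PySem.Chars.strip s.toList).head? = some '-' then (PySem.Chars.strip s.toList).tail
      else PySem.Chars.strip s.toList), x ∈ (['a', 'e', 'i', 'o', 'u'] : List Char) := by
    intro x hx; simpa using hall0 x hx
  obtain ⟨c, rest, hcs⟩ : ∃ c rest, PySem.Chars.strip s.toList = c :: rest :=
    List.exists_cons_of_ne_nil hne
  have hs : ¬ (s = "") := by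
    intro h; subst h
    have h0 : PySem.Chars.strip ("" : String).toList = [] := by decide
    rw [h0] at hcs; cases hcs
  rw [hcs] at hbne hall
  simp only [List.head?_cons, List.tail_cons, Option.some.injEq] at hbne hall
  unfold from_custom_base5 from_custom_base5_alt
  rw [if_neg hs, if_neg hs, hcs]
  have hget : PySem.List.pyGet? (c :: rest) 0 = some c := by
    simp [PySem.List.pyGet?, PySem.List.pyIdx?]
  have hslice : PySem.List.slice (c :: rest) (some 1) none = rest := by
    simp [PySem.List.slice]
  by_cases hsign : c = '+' ∨ c = '-'
  · -- signed: A's res = B's body = rest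
    have hb : (c == '+' || c == '-') = true := by
      rcases hsign with h | h <;> simp [h]
    rw [if_pos hsign] at hbne hall
    have hfil : rest.filter (fun x => !((['a','e','i','o','u'] : List Char).contains x)) = [] := by
      rw [List.filter_eq_nil_iff]; intro x hx
      have hx5 := hall x hx; fin_cases hx5 <;> decide
    simp only [hget, hb, hslice, hfil, if_true, if_neg hbne]
    exact pvCore rest (some c = some '-') (c == '-') (by simp) hbne hall
  · -- unsigned: A's res = B's body = c :: rest
    have hb : (c == '+' || c == '-') = false := by
      simp only [not_or] at hsign; simp [hsign.1, hsign.2]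
    rw [if_neg hsign] at hbne hall
    have hfil : (c :: rest).filter (fun x => !((['a','e','i','o','u'] : List Char).contains x)) = [] := by
      rw [List.filter_eq_nil_iff]; intro x hx
      have hx5 := hall x hx; fin_cases hx5 <;> decide
    have hcm : (c == '-') = false := by
      simp only [not_or] at hsign; simp [hsign.2]
    simp only [hget, hb, hfil, Bool.false_eq_true, if_false, if_true, if_neg hbne]
    exact pvCore (c :: rest) ((none : Option Char) = some '-') (c == '-') (by simp [hcm]) hbne hall

-- ===== VERDICT (by name: the statement is the Claim_ definition above) =====
theorem from_custom_base5_spec : Claim_equal_from_custom_base5 := by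
  intro s _ hpre
  exact from_custom_base5_spec_aux s hpre
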